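-- pv_equiv track=rewrite | github.com/efim1222/prepareEGE | openfipi/5.py | f
-- ===== SOURCE A (Python) =====
-- def f(n):
--     n2 = bin(n)[2:]
--     if n % 2 == 0:
--         n2 = '1' + n2 + '00'
--     else:
--         ns = bin(sum(int(i) for i in n2))[2:]
--         n2 = n2 + ns
--     return int(n2, 2)
-- ===== SOURCE B (Python) =====
-- def f(n):
--     if n % 2 == 0:
--         return (n + (1 << max(n.bit_length(), 1))) * 4
--     s = n.bit_count()
--     return (n << s.bit_length()) + s
-- ===== Notes on version B (the rewrite author's own statement) =====
-- stated objective: simpler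
-- what changed: Replaced building binary strings by concatenation and re-parsing them with int(x, base two) by closed-form shift/add arithmetic: for even n it adds the power of two just above the highest bit and shifts left twice; for odd n it shifts n left by the popcount's bit length and adds the popcount.
import Mathlib
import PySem

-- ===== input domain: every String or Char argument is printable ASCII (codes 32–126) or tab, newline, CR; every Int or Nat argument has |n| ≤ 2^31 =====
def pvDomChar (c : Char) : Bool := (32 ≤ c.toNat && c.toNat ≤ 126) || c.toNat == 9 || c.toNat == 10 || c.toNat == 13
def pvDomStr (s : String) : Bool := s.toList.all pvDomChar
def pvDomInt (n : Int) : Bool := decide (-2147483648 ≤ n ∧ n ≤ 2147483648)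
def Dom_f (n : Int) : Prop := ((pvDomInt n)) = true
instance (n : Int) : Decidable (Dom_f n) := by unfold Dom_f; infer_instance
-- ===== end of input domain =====

-- B replaces A's binary-string concatenation and re-parsing by closed-form shift/add arithmetic
-- on bit_length/bit_count (objective: simpler).

-- ===== PORT A =====
-- int(x, 2): every string A feeds it is a nonempty '0'/'1'-digit string produced by bin(),
-- so int(x, 2) is exactly this left fold there (no sign/whitespace/underscore/prefix handling
-- is reachable); ported by hand because the fold is what int(x, 2) computes on that domain.
def intBin (cs : List Char) : Int :=
  cs.foldl (fun a c => 2 * a + ((c.toNat : Int) - 48)) 0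

def f (n : Int) : Int :=
  -- n2 = bin(n)[2:]
  let n2 := PySem.List.slice (PySem.Int.toBinChars0b n) (some 2) none
  if PySem.Int.mod n 2 = 0 then
    -- n2 = '1' + n2 + '00'
    intBin ('1' :: n2 ++ ['0', '0'])
  else
    -- int(i) on the single digit character i is its digit value (exact for '0'..'9')
    let s := (n2.map (fun c => (c.toNat : Int) - 48)).sum
    -- ns = bin(s)[2:]
    let ns := PySem.List.slice (PySem.Int.toBinChars0b s) (some 2) none
    intBin (n2 ++ ns)

-- ===== PORT B =====
def f_alt (n : Int) : Int :=
  if PySem.Int.mod n 2 = 0 then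
    (n + ((1 : Int) <<< max (PySem.Int.bitLength n) 1)) * 4
  else
    let s := PySem.Int.bitCount n
    (n <<< PySem.Int.bitLength (s : Int)) + (s : Int)

-- ===== PRECONDITION & SPEC =====
-- Pre_ excludes negative n, on which A raises ValueError (bin(-k)[2:] keeps the 'b' of '-0b').
def Pre_f (n : Int) : Prop := 0 ≤ n
instance (n : Int) : Decidable (Pre_f n) := by unfold Pre_f; infer_instance

def pvWitness_f : Int := 6

def Spec_f (n : Int) (out : Int) : Prop := out = f_alt n
instance (n : Int) (out : Int) : Decidable (Spec_f n out) := by unfold Spec_f; infer_instance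

-- ===== CLAIM (what is proved, stated in full; the proofs are below) =====
def Claim_equal_f : Prop := ∀ (n : Int), Dom_f n → Pre_f n → Spec_f n (f n)

-- ===== LEMMAS AND PROOFS =====

-- The binary digit string of m, most significant bit first: the value of Nat.toDigits 2 m.
def bits : Nat → List Char
  | n =>
    if _h : n < 2 then [Nat.digitChar n]
    else bits (n / 2) ++ [Nat.digitChar (n % 2)]
  decreasing_by exact Nat.div_lt_self (by omega) (by omega)

theorem toDigitsCore_eq_bits : ∀ (fuel n : Nat) (ds : List Char), n < fuel →
    Nat.toDigitsCore 2 fuel n ds = bits n ++ ds := by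
  intro fuel
  induction fuel with
  | zero => intro n ds h; omega
  | succ fuel ih =>
    intro n ds h
    rw [Nat.toDigitsCore, bits]
    by_cases hlt : n < 2
    · have hd : n / 2 = 0 := by omega
      have hm : n % 2 = n := by omega
      simp [hd, hm, hlt]
    · have hd : ¬ n / 2 = 0 := by omega
      simp only [hd, if_false, dif_neg hlt]
      rw [ih (n / 2) _ (by omega)]
      simp

theorem toDigits_eq_bits (n : Nat) : Nat.toDigits 2 n = bits n := by
  have := toDigitsCore_eq_bits (n + 1) n [] (by omega)
  simpa [Nat.toDigits] using this

theorem bits_foldl (m : Nat) : ∀ a : Int,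
    (bits m).foldl (fun a c => 2 * a + ((c.toNat : Int) - 48)) a
      = a * 2 ^ (bits m).length + m := by
  induction m using Nat.strong_induction_on with
  | _ m ih =>
    intro a
    rw [bits]
    by_cases h : m < 2
    · interval_cases m <;> simp [Nat.digitChar] <;> ring
    · simp only [dif_neg h, List.foldl_append, List.length_append, List.length_singleton]
      rw [ih (m / 2) (Nat.div_lt_self (by omega) (by omega)) a]
      have hm : (m : Int) = 2 * ((m / 2 : Nat) : Int) + ((m % 2 : Nat) : Int) := by
        have := Nat.div_add_mod m 2; push_cast; omega
      have hdig : ((Nat.digitChar (m % 2)).toNat : Int) - 48 = ((m % 2 : Nat) : Int) := by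
        have hcase : m % 2 = 0 ∨ m % 2 = 1 := by omega
        rcases hcase with h0 | h1
        · rw [h0]; decide
        · rw [h1]; decide
      simp only [List.foldl_cons, List.foldl_nil, hdig]
      rw [hm]
      ring

theorem bitLength_pos (k : Nat) (hk : 0 < k) : 1 ≤ PySem.Int.bitLength (k : Int) := by
  rw [PySem.Int.bitLength_natCast hk]; omega

theorem bits_length (m : Nat) :
    (bits m).length = max (PySem.Int.bitLength (m : Int)) 1 := by
  induction m using Nat.strong_induction_on with
  | _ m ih =>
    rw [bits]
    by_cases h : m < 2
    · interval_cases m <;> simp [PySem.Int.bitLength] <;> decide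
    · simp only [dif_neg h, List.length_append, List.length_singleton]
      rw [ih (m / 2) (Nat.div_lt_self (by omega) (by omega))]
      have h1 : 1 ≤ PySem.Int.bitLength ((m / 2 : Nat) : Int) := bitLength_pos _ (by omega)
      have h2 : PySem.Int.bitLength (m : Int)
          = PySem.Int.bitLength ((m / 2 : Nat) : Int) + 1 :=
        PySem.Int.bitLength_natCast (by omega)
      omega

theorem bits_sum (m : Nat) :
    ((bits m).map (fun c => (c.toNat : Int) - 48)).sum
      = ((PySem.Int.bitCount (m : Int) : Nat) : Int) := by
  induction m using Nat.strong_induction_on with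
  | _ m ih =>
    rw [bits]
    by_cases h : m < 2
    · interval_cases m <;> decide
    · simp only [dif_neg h, List.map_append, List.sum_append, List.map_cons, List.map_nil,
        List.sum_cons, List.sum_nil]
      rw [ih (m / 2) (Nat.div_lt_self (by omega) (by omega))]
      have hdig : ((Nat.digitChar (m % 2)).toNat : Int) - 48 = ((m % 2 : Nat) : Int) := by
        have hcase : m % 2 = 0 ∨ m % 2 = 1 := by omega
        rcases hcase with h0 | h1
        · rw [h0]; decide
        · rw [h1]; decide
      have hbc : PySem.Int.bitCount (m : Int)
          = m % 2 + PySem.Int.bitCount ((m / 2 : Nat) : Int) :=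
        PySem.Int.bitCount_natCast (by omega)
      rw [hdig, hbc]
      push_cast
      ring

-- bin(n)[2:] for 0 ≤ n is the plain digit string.
theorem slice_toBinChars0b (n : Int) (hn : 0 ≤ n) :
    PySem.List.slice (PySem.Int.toBinChars0b n) (some 2) none = bits n.toNat := by
  have h2 : (2 : Int) = ((2 : Nat) : Int) := rfl
  rw [h2, PySem.List.slice_from_natCast]
  rw [PySem.Int.toBinChars0b, if_neg (by omega)]
  simp [toDigits_eq_bits]

theorem f_eq_f_alt (n : Int) (hn : 0 ≤ n) : f n = f_alt n := by
  obtain ⟨m, rfl⟩ : ∃ m : Nat, n = (m : Int) := ⟨n.toNat, (Int.toNat_of_nonneg hn).symm⟩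
  have hslice := slice_toBinChars0b (m : Int) hn
  simp only [Int.toNat_natCast] at hslice
  unfold f f_alt
  simp only [hslice]
  by_cases hev : PySem.Int.mod (m : Int) 2 = 0
  · simp only [if_pos hev]
    unfold intBin
    simp only [List.foldl_cons, List.foldl_append]
    rw [show (2 * 0 + ((('1').toNat : Int) - 48)) = 1 by decide]
    rw [bits_foldl m 1, bits_length m]
    simp only [List.foldl_nil]
    rw [show (('0').toNat : Int) - 48 = 0 by decide]
    rw [Int.shiftLeft_eq]
    ring
  · simp only [if_neg hev]
    unfold intBin
    have hodd : m % 2 = 1 := by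
      have h2 : ¬ ((2 : Int) ∣ (m : Int)) := by
        intro hdvd
        exact hev (by rw [PySem.Int.mod_eq_zero_iff_dvd]; exact hdvd)
      omega
    have hmpos : 0 < m := by omega
    rw [bits_sum m]
    set s : Nat := PySem.Int.bitCount (m : Int) with hs
    have hspos : 0 < s := by
      have := PySem.Int.bitCount_natCast (m := m) hmpos
      rw [← hs] at this
      omega
    have hssl : PySem.List.slice (PySem.Int.toBinChars0b ((s : Nat) : Int)) (some 2) none
        = bits s := by
      have := slice_toBinChars0b ((s : Nat) : Int) (by positivity)
      simpa using this
    rw [hssl, List.foldl_append, bits_foldl m 0, bits_foldl s, bits_length s]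
    have hmax : max (PySem.Int.bitLength ((s : Nat) : Int)) 1
        = PySem.Int.bitLength ((s : Nat) : Int) := by
      have := bitLength_pos s hspos
      omega
    rw [hmax, Int.shiftLeft_eq]
    ring

-- ===== VERDICT (by name: the statement is the Claim_ definition above) =====
theorem f_spec : Claim_equal_f := by
  intro n _ hpre
  unfold Spec_f
  exact f_eq_f_alt n hpre
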